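-- pv_equiv track=rewrite | github.com/19h/isa-classifier | armgen/oracle/matrix.py | categorize_program
-- ===== SOURCE A (Python) =====
-- def categorize_program(name: str) -> str:
--     """Categorize a program based on its name."""
--     prefixes = {
--         "min_": "minimal",
--         "simd_": "simd",
--         "fp_": "floating_point",
--         "int_": "integer",
--         "syscall_": "syscall",
--         "asm_": "assembly",
--         "cf_": "control_flow",
--         "call_": "calling_convention",
--         "mem_": "memory",
--         "cpp_": "cpp_features",
--     }
--     for prefix, category in prefixes.items():
--         if name.startswith(prefix):
--             return category
--     return "general"
-- ===== SOURCE B (Python) =====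
-- def categorize_program(name: str) -> str:
--     """Categorize a program based on its name."""
--     head, sep, _tail = name.partition("_")
--     if not sep:
--         return "general"
--     return {
--         "min": "minimal",
--         "simd": "simd",
--         "fp": "floating_point",
--         "int": "integer",
--         "syscall": "syscall",
--         "asm": "assembly",
--         "cf": "control_flow",
--         "call": "calling_convention",
--         "cpp": "cpp_features",
--         "mem": "memory",
--     }.get(head, "general")
-- ===== Notes on version B (the rewrite author's own statement) =====
-- stated objective: idiomatic
-- what changed: Instead of scanning all 10 prefixes with startswith, B partitions the name at its first underscore and does a single dict lookup on the bare leading token (keys without the trailing underscore).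
import Mathlib
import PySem

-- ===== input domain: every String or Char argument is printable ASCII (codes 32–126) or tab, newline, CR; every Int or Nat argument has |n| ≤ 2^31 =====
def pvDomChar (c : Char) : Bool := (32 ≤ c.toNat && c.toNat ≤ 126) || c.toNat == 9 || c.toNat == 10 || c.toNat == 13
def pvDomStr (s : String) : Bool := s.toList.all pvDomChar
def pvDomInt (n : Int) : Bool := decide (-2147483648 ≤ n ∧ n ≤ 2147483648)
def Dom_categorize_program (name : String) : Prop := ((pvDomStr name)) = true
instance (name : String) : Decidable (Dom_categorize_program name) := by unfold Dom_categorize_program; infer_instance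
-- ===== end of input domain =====

-- B replaces A's scan over ten startswith prefixes by partitioning the name at its
-- first underscore and doing a single dict lookup on the bare leading token (idiomatic; same cost class).


-- ===== PORT A =====
-- loop 'for prefix, category in prefixes.items(): if name.startswith(prefix): return category'
def catLoopA (name : String) : List (String × String) → String
  | [] => "general"
  | (p, c) :: rest => if PySem.Str.startswith name p then c else catLoopA name rest

def categorize_program (name : String) : String :=
  let prefixes : PySem.Dict String String := PySem.Dict.ofList
    [("min_", "minimal"), ("simd_", "simd"), ("fp_", "floating_point"),
     ("int_", "integer"), ("syscall_", "syscall"), ("asm_", "assembly"),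
     ("cf_", "control_flow"), ("call_", "calling_convention"),
     ("mem_", "memory"), ("cpp_", "cpp_features")]
  catLoopA name prefixes.items

-- ===== PORT B =====
-- name.partition("_") ported by hand over List Char (exact for a one-char separator):
-- head = the chars before the first '_', sep is nonempty iff '_' occurs in name.
def categorize_program_alt (name : String) : String :=
  let cs := name.toList
  if '_' ∈ cs then
    (PySem.Dict.ofList
      [("min", "minimal"), ("simd", "simd"), ("fp", "floating_point"),
       ("int", "integer"), ("syscall", "syscall"), ("asm", "assembly"),
       ("cf", "control_flow"), ("call", "calling_convention"),
       ("cpp", "cpp_features"), ("mem", "memory")] : PySem.Dict String String).getD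
      (String.ofList (cs.takeWhile (· ≠ '_'))) "general"
  else "general"

-- ===== PRECONDITION & SPEC =====
def Spec_categorize_program (name : String) (out : String) : Prop := out = categorize_program_alt name
instance (name : String) (out : String) : Decidable (Spec_categorize_program name out) := by unfold Spec_categorize_program; infer_instance

-- ===== CLAIM =====
def Claim_equal_categorize_program : Prop := ∀ (name : String), Dom_categorize_program name → Spec_categorize_program name (categorize_program name)

-- ===== LEMMAS AND PROOFS =====

theorem drop_cons (l : List Char) (h : '_' ∈ l) :
    l.dropWhile (· ≠ '_') = '_' :: (l.dropWhile (· ≠ '_')).tail := by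
  induction l with
  | nil => cases h
  | cons c r ih =>
    by_cases hc : c = '_'
    · subst hc; simp
    · have hr : '_' ∈ r := by cases h with | head => exact absurd rfl hc | tail _ h => exact h
      simpa [hc] using ih hr

theorem prefix_under (cs : List Char) : ∀ (pre post : List Char), '_' ∉ cs → '_' ∉ pre →
    ((cs ++ ['_']).isPrefixOf (pre ++ '_' :: post) = decide (pre = cs)) := by
  induction cs with
  | nil =>
    intro pre post _ hpre
    cases pre with
    | nil => simp [List.isPrefixOf]
    | cons a pre' =>
      have : a ≠ '_' := fun h => hpre (h ▸ List.mem_cons_self)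
      simp [List.isPrefixOf, Ne.symm this]
  | cons c cs' ih =>
    intro pre post hcs hpre
    have hc : c ≠ '_' := fun h => hcs (h ▸ List.mem_cons_self)
    cases pre with
    | nil => simp [List.isPrefixOf, hc]
    | cons a pre' =>
      have hcs' : '_' ∉ cs' := fun h => hcs (List.mem_cons_of_mem _ h)
      have hpre' : '_' ∉ pre' := fun h => hpre (List.mem_cons_of_mem _ h)
      simp [List.isPrefixOf, ih pre' post hcs' hpre']
      by_cases hac : c = a
      · subst hac; simp [eq_comm]
      · simp [hac, Ne.symm hac]

set_option maxHeartbeats 1000000 in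
theorem categorize_program_main (name : String) :
    categorize_program name = categorize_program_alt name := by
  have hitems : (PySem.Dict.ofList
      [("min_", "minimal"), ("simd_", "simd"), ("fp_", "floating_point"),
       ("int_", "integer"), ("syscall_", "syscall"), ("asm_", "assembly"),
       ("cf_", "control_flow"), ("call_", "calling_convention"),
       ("mem_", "memory"), ("cpp_", "cpp_features")] : PySem.Dict String String).items =
      [("min_", "minimal"), ("simd_", "simd"), ("fp_", "floating_point"),
       ("int_", "integer"), ("syscall_", "syscall"), ("asm_", "assembly"),
       ("cf_", "control_flow"), ("call_", "calling_convention"),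
       ("mem_", "memory"), ("cpp_", "cpp_features")] := by decide
  by_cases hu : '_' ∈ name.toList
  · set pre := name.toList.takeWhile (· ≠ '_') with hpre_def
    have hpre : '_' ∉ pre := by
      intro h
      have := List.mem_takeWhile_imp h
      simp at this
    have hl : name.toList = pre ++ '_' :: (name.toList.dropWhile (· ≠ '_')).tail := by
      have h1 := List.takeWhile_append_dropWhile (p := fun c => decide (c ≠ '_'))
        (l := name.toList)
      rw [drop_cons _ hu] at h1
      exact h1.symm
    have e : ∀ (cs : List Char) (t : String), t.toList = cs ++ ['_'] → '_' ∉ cs →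
        PySem.Str.startswith name t = decide (pre = cs) := by
      intro cs t ht hcs
      show PySem.Chars.startswith name.toList t.toList = _
      rw [PySem.Chars.startswith, hl, ht]
      exact prefix_under cs pre _ hcs hpre
    have k : ∀ (cs : List Char) (t : String), t.toList = cs →
        (t == String.ofList pre) = decide (pre = cs) := by
      intro cs t ht
      subst ht
      simp only [beq_eq_decide]
      rw [decide_eq_decide]
      constructor
      · intro h; rw [h]; simp
      · intro h; rw [h]; simp
    have hB : categorize_program_alt name =
        (PySem.Dict.ofList
          [("min", "minimal"), ("simd", "simd"), ("fp", "floating_point"),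
           ("int", "integer"), ("syscall", "syscall"), ("asm", "assembly"),
           ("cf", "control_flow"), ("call", "calling_convention"),
           ("cpp", "cpp_features"), ("mem", "memory")] : PySem.Dict String String).getD
          (String.ofList pre) "general" := by
      unfold categorize_program_alt
      rw [if_pos hu]
    rw [hB]
    show catLoopA name (PySem.Dict.ofList
      [("min_", "minimal"), ("simd_", "simd"), ("fp_", "floating_point"),
       ("int_", "integer"), ("syscall_", "syscall"), ("asm_", "assembly"),
       ("cf_", "control_flow"), ("call_", "calling_convention"),
       ("mem_", "memory"), ("cpp_", "cpp_features")] : PySem.Dict String String).items = _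
    rw [hitems]
    simp only [catLoopA]
    rw [e ['m','i','n'] "min_" (by decide) (by decide),
        e ['s','i','m','d'] "simd_" (by decide) (by decide),
        e ['f','p'] "fp_" (by decide) (by decide),
        e ['i','n','t'] "int_" (by decide) (by decide),
        e ['s','y','s','c','a','l','l'] "syscall_" (by decide) (by decide),
        e ['a','s','m'] "asm_" (by decide) (by decide),
        e ['c','f'] "cf_" (by decide) (by decide),
        e ['c','a','l','l'] "call_" (by decide) (by decide),
        e ['m','e','m'] "mem_" (by decide) (by decide),
        e ['c','p','p'] "cpp_" (by decide) (by decide)]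
    have hd : (PySem.Dict.ofList
      [("min", "minimal"), ("simd", "simd"), ("fp", "floating_point"),
       ("int", "integer"), ("syscall", "syscall"), ("asm", "assembly"),
       ("cf", "control_flow"), ("call", "calling_convention"),
       ("cpp", "cpp_features"), ("mem", "memory")] : PySem.Dict String String) =
      PySem.Dict.mk
      [("min", "minimal"), ("simd", "simd"), ("fp", "floating_point"),
       ("int", "integer"), ("syscall", "syscall"), ("asm", "assembly"),
       ("cf", "control_flow"), ("call", "calling_convention"),
       ("cpp", "cpp_features"), ("mem", "memory")] := by decide
    rw [hd, PySem.Dict.getD_eq_get?_getD]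
    simp only [PySem.Dict.get?_mk_cons,
        k ['m','i','n'] "min" (by decide),
        k ['s','i','m','d'] "simd" (by decide),
        k ['f','p'] "fp" (by decide),
        k ['i','n','t'] "int" (by decide),
        k ['s','y','s','c','a','l','l'] "syscall" (by decide),
        k ['a','s','m'] "asm" (by decide),
        k ['c','f'] "cf" (by decide),
        k ['c','a','l','l'] "call" (by decide),
        k ['c','p','p'] "cpp" (by decide),
        k ['m','e','m'] "mem" (by decide)]
    by_cases h1 : pre = ['m','i','n']
    · simp [h1, PySem.Dict.get?]
    by_cases h2 : pre = ['s','i','m','d']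
    · simp [h1, h2, PySem.Dict.get?]
    by_cases h3 : pre = ['f','p']
    · simp [h1, h2, h3, PySem.Dict.get?]
    by_cases h4 : pre = ['i','n','t']
    · simp [h1, h2, h3, h4, PySem.Dict.get?]
    by_cases h5 : pre = ['s','y','s','c','a','l','l']
    · simp [h1, h2, h3, h4, h5, PySem.Dict.get?]
    by_cases h6 : pre = ['a','s','m']
    · simp [h1, h2, h3, h4, h5, h6, PySem.Dict.get?]
    by_cases h7 : pre = ['c','f']
    · simp [h1, h2, h3, h4, h5, h6, h7, PySem.Dict.get?]
    by_cases h8 : pre = ['c','a','l','l']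
    · simp [h1, h2, h3, h4, h5, h6, h7, h8, PySem.Dict.get?]
    by_cases h9 : pre = ['m','e','m']
    · simp [h1, h2, h3, h4, h5, h6, h7, h8, h9, PySem.Dict.get?]
    by_cases h10 : pre = ['c','p','p']
    · simp [h1, h2, h3, h4, h5, h6, h7, h8, h9, h10, PySem.Dict.get?]
    · simp [h1, h2, h3, h4, h5, h6, h7, h8, h9, h10, PySem.Dict.get?]
  · have hB : categorize_program_alt name = "general" := by
      unfold categorize_program_alt
      rw [if_neg hu]
    have hA : ∀ p : String, '_' ∈ p.toList → PySem.Str.startswith name p = false := by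
      intro p hp
      by_contra hco
      have hb : PySem.Chars.startswith name.toList p.toList = true := by
        simpa [PySem.Str.startswith] using hco
      rw [PySem.Chars.startswith] at hb
      exact hu ((List.isPrefixOf_iff_prefix.mp hb).subset hp)
    rw [hB]
    show catLoopA name (PySem.Dict.ofList
      [("min_", "minimal"), ("simd_", "simd"), ("fp_", "floating_point"),
       ("int_", "integer"), ("syscall_", "syscall"), ("asm_", "assembly"),
       ("cf_", "control_flow"), ("call_", "calling_convention"),
       ("mem_", "memory"), ("cpp_", "cpp_features")] : PySem.Dict String String).items = _
    rw [hitems]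
    simp only [catLoopA,
      hA "min_" (by decide), hA "simd_" (by decide), hA "fp_" (by decide),
      hA "int_" (by decide), hA "syscall_" (by decide), hA "asm_" (by decide),
      hA "cf_" (by decide), hA "call_" (by decide), hA "mem_" (by decide),
      hA "cpp_" (by decide), Bool.false_eq_true, if_false]

-- ===== VERDICT =====
theorem categorize_program_spec : Claim_equal_categorize_program := by
  intro name _
  unfold Spec_categorize_program
  exact categorize_program_main name
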